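-- pv_equiv track=rewrite | github.com/nirankusha/DxD_NMT | pipeline/target_extractor.py | map_targets_to_positions
-- ===== SOURCE A (Python) =====
-- from typing import Tuple, List
--
-- def map_targets_to_positions(target_words: Tuple[str, ...], tgt_tokens: List[str]) -> List[int]:
--     """Return first‑match indices of each target word in the tokenized target (‑1 if missing)."""
--     idxs = []
--     used = set()
--     for w in target_words or []:
--         found = -1
--         wl = w.lower()
--         for i, tok in enumerate(tgt_tokens):
--             if i in used:
--                 continue
--             if tok.lower() == wl:
--                 found = i
--                 used.add(i)
--                 break
--         idxs.append(found)
--     return idxs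
-- ===== SOURCE B (Python) =====
-- from typing import Tuple, List
--
-- def map_targets_to_positions(target_words: Tuple[str, ...], tgt_tokens: List[str]) -> List[int]:
--     """Return first-match indices of each target word in the tokenized target (-1 if missing)."""
--     queues = {}
--     for i, tok in enumerate(tgt_tokens):
--         queues.setdefault(tok.lower(), []).append(i)
--     heads = {}
--     out = []
--     for w in target_words or []:
--         wl = w.lower()
--         q = queues.get(wl, [])
--         p = heads.get(wl, 0)
--         if p < len(q):
--             out.append(q[p])
--             heads[wl] = p + 1
--         else:
--             out.append(-1)
--     return out
-- ===== Notes on version B (the rewrite author's own statement) =====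
-- stated objective: faster
-- what changed: Instead of rescanning all tokens per word while skipping a 'used' set, B builds one dict from lowered token to the queue of its indices and serves each word from its queue head pointer.
import Mathlib
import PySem

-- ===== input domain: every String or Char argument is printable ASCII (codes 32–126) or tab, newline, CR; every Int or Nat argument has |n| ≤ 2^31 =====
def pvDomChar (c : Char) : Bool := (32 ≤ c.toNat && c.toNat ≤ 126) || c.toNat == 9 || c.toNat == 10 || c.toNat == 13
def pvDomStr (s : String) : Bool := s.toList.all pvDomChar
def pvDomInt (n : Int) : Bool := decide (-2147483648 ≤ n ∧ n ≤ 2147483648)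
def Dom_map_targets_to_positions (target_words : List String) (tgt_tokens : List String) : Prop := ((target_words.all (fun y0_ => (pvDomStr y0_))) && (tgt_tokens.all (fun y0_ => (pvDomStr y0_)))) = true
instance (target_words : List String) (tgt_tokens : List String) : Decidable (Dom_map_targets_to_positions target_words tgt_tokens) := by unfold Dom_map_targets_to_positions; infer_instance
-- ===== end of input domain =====

-- B replaces A's per-word rescan of the tokens (skipping a 'used' set) by one dict
-- from lowered token to the queue of its indices, served via a head pointer: measurably faster.

-- ===== PORT A =====
-- inner 'for i, tok in enumerate(tgt_tokens)' with continue/break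
def pvAFind (used : PySem.Set Int) (wl : String) : List (Int × String) → Option Int
  | [] => none
  | (i, tok) :: rest =>
    if used.contains i then pvAFind used wl rest
    else if PySem.Str.lower tok == wl then some i
    else pvAFind used wl rest

-- outer 'for w in target_words or []'
def pvALoop (tgt_tokens : List String) : List String → PySem.Set Int → List Int
  | [], _ => []
  | w :: ws, used =>
    let wl := PySem.Str.lower w
    match pvAFind used wl (PySem.List.enumerate tgt_tokens 0) with
    | some i => i :: pvALoop tgt_tokens ws (PySem.Set.add used i)
    | none => (-1) :: pvALoop tgt_tokens ws used

def map_targets_to_positions (target_words : List String) (tgt_tokens : List String) : List Int :=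
  pvALoop tgt_tokens target_words PySem.Set.empty

-- ===== PORT B =====
-- 'queues.setdefault(tok.lower(), []).append(i)' over enumerate(tgt_tokens)
def pvBQueues (tgt_tokens : List String) : PySem.Dict String (List Int) :=
  (PySem.List.enumerate tgt_tokens 0).foldl
    (fun d it => d.modify (PySem.Str.lower it.2) [] (· ++ [it.1])) PySem.Dict.empty

-- 'for w in target_words or []' with a head-pointer dict
def pvBLoop (queues : PySem.Dict String (List Int)) :
    List String → PySem.Dict String Int → List Int
  | [], _ => []
  | w :: ws, heads =>
    let wl := PySem.Str.lower w
    let q := queues.getD wl []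
    let p := heads.getD wl 0
    if p < (q.length : Int) then
      PySem.List.pyGetD q p 0 :: pvBLoop queues ws (heads.insert wl (p + 1))
    else
      (-1) :: pvBLoop queues ws heads

def map_targets_to_positions_alt (target_words : List String) (tgt_tokens : List String) : List Int :=
  pvBLoop (pvBQueues tgt_tokens) target_words PySem.Dict.empty

-- ===== PRECONDITION & SPEC =====
def Spec_map_targets_to_positions (target_words : List String) (tgt_tokens : List String) (out : List Int) : Prop := out = map_targets_to_positions_alt target_words tgt_tokens
instance (target_words : List String) (tgt_tokens : List String) (out : List Int) : Decidable (Spec_map_targets_to_positions target_words tgt_tokens out) := by unfold Spec_map_targets_to_positions; infer_instance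

-- ===== CLAIM (what is proved, stated in full; the proofs are below) =====
def Claim_equal_map_targets_to_positions : Prop := ∀ (target_words : List String) (tgt_tokens : List String), Dom_map_targets_to_positions target_words tgt_tokens → Spec_map_targets_to_positions target_words tgt_tokens (map_targets_to_positions target_words tgt_tokens)

-- ===== LEMMAS AND PROOFS =====

-- the (lowered-key, index) pairs B's build loop processes
def pvPairs (tgt_tokens : List String) : List (String × Int) :=
  (PySem.List.enumerate tgt_tokens 0).map (fun it => (PySem.Str.lower it.2, it.1))

-- ascending list of token indices whose lowered token is k
def pvFull (tgt_tokens : List String) (k : String) : List Int :=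
  ((pvPairs tgt_tokens).filter (fun pr => pr.1 == k)).map (·.2)

lemma pvBQueues_getD (tgt_tokens : List String) (k : String) :
    (pvBQueues tgt_tokens).getD k [] = pvFull tgt_tokens k := by
  unfold pvBQueues pvFull pvPairs
  rw [show (PySem.List.enumerate tgt_tokens 0).foldl
      (fun d it => d.modify (PySem.Str.lower it.2) [] (· ++ [it.1])) PySem.Dict.empty
    = ((PySem.List.enumerate tgt_tokens 0).map (fun it => (PySem.Str.lower it.2, it.1))).foldl
      (fun d p => d.modify p.1 [] (· ++ [p.2])) PySem.Dict.empty from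
      (List.foldl_map (g := fun (d : PySem.Dict String (List Int)) (p : String × Int) =>
          d.modify p.1 [] (· ++ [p.2]))
        (f := fun it : Int × String => (PySem.Str.lower it.2, it.1))).symm]
  rw [PySem.Dict.getD_foldl_modify_append]
  simp [PySem.Dict.getD_empty]

lemma pvFind_eq (used : PySem.Set Int) (wl : String) (ps : List (Int × String)) :
    pvAFind used wl ps =
      (((ps.map (fun it => (PySem.Str.lower it.2, it.1))).filter (fun pr => pr.1 == wl)
          |>.map (·.2)).filter (fun i => !used.contains i)).head? := by
  induction ps with
  | nil => simp [pvAFind]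
  | cons h t ih =>
    obtain ⟨i, tok⟩ := h
    cases hu : used.contains i <;> cases hk : (PySem.Str.lower tok == wl) <;>
      simp only [pvAFind, hu, hk, ih, List.map_cons, List.filter_cons, Bool.not_true,
        Bool.not_false, if_true, if_false, List.head?_cons, Bool.false_eq_true]

lemma pvSnd_pairs_nodup (tgt_tokens : List String) :
    ((pvPairs tgt_tokens).map (·.2)).Nodup := by
  unfold pvPairs
  rw [List.map_map]
  have : ((fun (pr : String × Int) => pr.2) ∘ fun it : Int × String =>
      (PySem.Str.lower it.2, it.1)) = (·.1) := rfl
  rw [this, PySem.List.map_fst_enumerate]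
  exact PySem.List.nodup_pyRange_one _ _

lemma pvFull_nodup (tgt_tokens : List String) (k : String) :
    (pvFull tgt_tokens k).Nodup := by
  have hsub : (pvFull tgt_tokens k).Sublist ((pvPairs tgt_tokens).map (·.2)) :=
    List.Sublist.map _ List.filter_sublist
  exact List.Nodup.sublist hsub (pvSnd_pairs_nodup tgt_tokens)

lemma pvFull_key_unique (tgt_tokens : List String) (i : Int) (k1 k2 : String)
    (h1 : i ∈ pvFull tgt_tokens k1) (h2 : i ∈ pvFull tgt_tokens k2) : k1 = k2 := by
  unfold pvFull at h1 h2
  obtain ⟨p1, hp1, he1⟩ := List.mem_map.mp h1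
  obtain ⟨p2, hp2, he2⟩ := List.mem_map.mp h2
  rw [List.mem_filter] at hp1 hp2
  have heq : p1 = p2 :=
    List.inj_on_of_nodup_map (pvSnd_pairs_nodup tgt_tokens) hp1.1 hp2.1 (by rw [he1, he2])
  have e1 : p1.1 = k1 := by simpa using hp1.2
  have e2 : p2.1 = k2 := by simpa using hp2.2
  rw [← e1, ← e2, heq]

lemma pvLoop_eq (tgt_tokens : List String) (Q : PySem.Dict String (List Int))
    (hQ : ∀ k, Q.getD k [] = pvFull tgt_tokens k) :
    ∀ (ws : List String) (used : PySem.Set Int) (heads : PySem.Dict String Int),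
      (∀ k, 0 ≤ heads.getD k 0) →
      (∀ k, (pvFull tgt_tokens k).filter (fun i => !used.contains i) =
              (pvFull tgt_tokens k).drop (heads.getD k 0).toNat) →
      pvALoop tgt_tokens ws used = pvBLoop Q ws heads := by
  intro ws
  induction ws with
  | nil => intro _ _ _ _; rfl
  | cons w ws ih =>
    intro used heads hnn hinv
    set wl := PySem.Str.lower w with hwldef
    set q := pvFull tgt_tokens wl with hq
    set p := heads.getD wl 0 with hp
    have hp0 : 0 ≤ p := hnn wl
    have hfind : pvAFind used wl (PySem.List.enumerate tgt_tokens 0) = q[p.toNat]? := by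
      rw [pvFind_eq]
      have hfull : ((((PySem.List.enumerate tgt_tokens 0).map
          (fun it => (PySem.Str.lower it.2, it.1))).filter (fun pr => pr.1 == wl)).map (·.2))
          = q := rfl
      rw [hfull, hinv wl, ← hp, List.head?_drop]
    by_cases hlt : p < (q.length : Int)
    · have hplen : p.toNat < q.length := by omega
      have hget : q[p.toNat]? = some q[p.toNat] := List.getElem?_eq_getElem hplen
      set h := q[p.toNat] with hh
      have hAm : pvALoop tgt_tokens (w :: ws) used =
          h :: pvALoop tgt_tokens ws (PySem.Set.add used h) := by
        simp only [pvALoop, ← hwldef, hfind, hget]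
      have hBm : pvBLoop Q (w :: ws) heads =
          h :: pvBLoop Q ws (heads.insert wl (p + 1)) := by
        simp only [pvBLoop, ← hwldef, hQ wl, ← hq, ← hp, if_pos hlt]
        rw [PySem.List.pyGetD_eq_getElem q 0 hp0 hlt]
      rw [hAm, hBm]
      congr 1
      -- the new states still satisfy the invariant
      have hcont : ∀ i : Int, (!(PySem.Set.add used h).contains i)
          = (!(i == h) && !used.contains i) := by
        intro i
        by_cases h1 : i ∈ used <;> by_cases h2 : i = h <;> by_cases h3 : h ∈ used <;>
          simp [h1, h2, h3]
      have hmemh : h ∈ q := List.getElem_mem hplen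
      apply ih
      · intro k
        rw [PySem.Dict.getD_insert]
        split_ifs with hk
        · omega
        · exact hnn k
      · intro k
        have hfilter : (pvFull tgt_tokens k).filter (fun i => !(PySem.Set.add used h).contains i)
            = ((pvFull tgt_tokens k).filter (fun i => !used.contains i)).filter
                (fun i => !(i == h)) := by
          rw [List.filter_filter]
          exact List.filter_congr (fun i _ => hcont i)
        rw [hfilter, PySem.Dict.getD_insert]
        split_ifs with hk
        · subst hk
          rw [hinv wl, ← hp]
          have hdrop : q.drop p.toNat = h :: q.drop (p.toNat + 1) :=
            (List.getElem_cons_drop hplen).symm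
          have hnd : (q.drop p.toNat).Nodup :=
            List.Nodup.sublist (List.drop_sublist ..) (pvFull_nodup tgt_tokens wl)
          rw [hdrop] at hnd
          have hnotmem : h ∉ q.drop (p.toNat + 1) := (List.nodup_cons.mp hnd).1
          rw [← hq, hdrop]
          rw [List.filter_cons]
          simp only [BEq.refl, Bool.not_true, Bool.false_eq_true, if_false]
          rw [List.filter_eq_self.mpr fun a ha => by
            have hne : a ≠ h := fun he => hnotmem (he ▸ ha)
            simp [hne]]
          congr 1
          omega
        · rw [List.filter_eq_self.mpr fun a ha => by
              have hne : a ≠ h := fun he =>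
                hk (pvFull_key_unique tgt_tokens h k wl (he ▸ List.mem_of_mem_filter ha) hmemh)
              simp [hne]]
          exact hinv k
    · have hnone : q[p.toNat]? = none := List.getElem?_eq_none (by omega)
      have hAm : pvALoop tgt_tokens (w :: ws) used =
          (-1) :: pvALoop tgt_tokens ws used := by
        simp only [pvALoop, ← hwldef, hfind, hnone]
      have hBm : pvBLoop Q (w :: ws) heads = (-1) :: pvBLoop Q ws heads := by
        simp only [pvBLoop, ← hwldef, hQ wl, ← hq, ← hp, if_neg hlt]
      rw [hAm, hBm]
      congr 1
      exact ih used heads hnn hinv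

-- ===== VERDICT (by name: the statement is the Claim_ definition above) =====
theorem map_targets_to_positions_spec : Claim_equal_map_targets_to_positions := by
  intro tw tt _
  unfold Spec_map_targets_to_positions map_targets_to_positions map_targets_to_positions_alt
  exact pvLoop_eq tt (pvBQueues tt) (pvBQueues_getD tt) tw PySem.Set.empty PySem.Dict.empty
    (fun k => by simp [PySem.Dict.getD_empty])
    (fun k => by simp [PySem.Set.empty, PySem.Dict.getD_empty])
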